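-- pv_equiv track=rewrite | github.com/NavidNaf/CTF-Solve-with-Codes | misc-ctf-comps/2025-htbuniversityctf/one_trick_pony.py | generate_bits
-- ===== SOURCE A (Python) =====
-- from typing import List, Optional
--
-- def legendre_bit(a: int, p: int, exp: int) -> int:
--     # Euler criterion: 1 if quadratic residue, -1 otherwise; map to bit.
--     return 1 if pow(a, exp, p) == 1 else 0
--
-- def generate_bits(seed: int, p: int, nbits: int) -> List[int]:
--     exp = (p - 1) // 2
--     out = []
--     s = seed
--     for _ in range(nbits):
--         if s == 0:
--             s += 1
--         out.append(legendre_bit(s, p, exp))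
--         s = (s + 1) % p
--         if s == 0:
--             s += 1
--     return out
-- ===== SOURCE B (Python) =====
-- from typing import List
--
--
-- def generate_bits(seed: int, p: int, nbits: int) -> List[int]:
--     # p >= 2. After the first draw the state walks the cycle 1, 2, ..., p-1
--     # (the "+1 mod p, skip 0" update), so the j-th later state is
--     # ((t0 - 1 + j) % (p - 1)) + 1 in closed form: the bits become an
--     # independent-per-index comprehension instead of a loop-carried state.
--     if nbits <= 0:
--         return []
--     exp = (p - 1) // 2
--     first = 1 if seed == 0 else seed
--     t0 = (first + 1) % p
--     if t0 == 0:
--         t0 = 1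
--     return [1 if pow(first, exp, p) == 1 else 0] + [
--         1 if pow(((t0 - 1 + j) % (p - 1)) + 1, exp, p) == 1 else 0
--         for j in range(nbits - 1)
--     ]
-- ===== Notes on version B (the rewrite author's own statement) =====
-- stated objective: alternative
-- what changed: A's loop-carried zero-skipping state (s = (s+1) % p with a 0->1 fix each step) is replaced by a closed form of the walk -- after the first draw the state cycles through 1..p-1, so the j-th later state is ((t0-1+j) % (p-1)) + 1 -- turning the bit list into an independent-per-index comprehension.
-- outside the precondition, e.g. on generate_bits(5, 1, 3): A returns [0, 0, 0], B raises ZeroDivisionError; on generate_bits(7, -9, 4): A returns [0, 0, 0, 0], B raises ValueError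
import Mathlib
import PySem

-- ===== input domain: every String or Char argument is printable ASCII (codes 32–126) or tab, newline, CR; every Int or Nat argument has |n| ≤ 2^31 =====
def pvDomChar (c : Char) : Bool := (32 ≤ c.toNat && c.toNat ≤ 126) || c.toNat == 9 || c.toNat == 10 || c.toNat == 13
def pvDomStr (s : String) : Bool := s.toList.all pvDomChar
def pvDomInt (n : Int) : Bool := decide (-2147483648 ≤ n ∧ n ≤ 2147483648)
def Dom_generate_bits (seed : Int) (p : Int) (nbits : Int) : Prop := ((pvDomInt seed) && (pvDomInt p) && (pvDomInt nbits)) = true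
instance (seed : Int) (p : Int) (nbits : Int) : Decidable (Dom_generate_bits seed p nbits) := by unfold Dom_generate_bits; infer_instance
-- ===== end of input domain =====

-- B replaces A's loop-carried zero-skipping state by the closed form of the walk:
-- after the first draw the state cycles through 1..p-1, so the j-th later state is
-- ((t0 - 1 + j) mod (p - 1)) + 1 and the bits become an independent comprehension.

-- ===== PORT A =====
-- pow(a, exp, p) is PySem.Int.powMod; under Pre_ (2 ≤ p) the exponent
-- (p-1)//2 is ≥ 0, so exp.toNat is exact there.
def legendre_bit (a : Int) (p : Int) (exp : Int) : Int :=
  if PySem.Int.powMod a exp.toNat p = 1 then 1 else 0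

def gbLoopA (p : Int) (exp : Int) : Nat → Int → List Int
  | 0, _ => []
  | Nat.succ k, s0 =>
    let s := if s0 = 0 then s0 + 1 else s0
    let b := legendre_bit s p exp
    let s1 := PySem.Int.mod (s + 1) p
    let s2 := if s1 = 0 then s1 + 1 else s1
    b :: gbLoopA p exp k s2

def generate_bits (seed : Int) (p : Int) (nbits : Int) : List Int :=
  gbLoopA p (PySem.Int.floordiv (p - 1) 2) nbits.toNat seed

-- ===== PORT B =====
def generate_bits_alt (seed : Int) (p : Int) (nbits : Int) : List Int :=
  if nbits ≤ 0 then []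
  else
    let exp := PySem.Int.floordiv (p - 1) 2
    let first := if seed = 0 then 1 else seed
    let t0' := PySem.Int.mod (first + 1) p
    let t0 := if t0' = 0 then 1 else t0'
    (if PySem.Int.powMod first exp.toNat p = 1 then (1 : Int) else 0) ::
      (PySem.List.pyRange 0 (nbits - 1) 1).map (fun j =>
        if PySem.Int.powMod (PySem.Int.mod (t0 - 1 + j) (p - 1) + 1) exp.toNat p = 1
        then (1 : Int) else 0)

-- ===== PRECONDITION & SPEC =====
-- Pre_ admits every nbits ≤ 0 (both return []) but otherwise excludes p ≤ 1: for
-- p ≤ 0 A raises ValueError on most inputs (negative exponent / zero modulus in pow)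
-- and B's natural cycle arithmetic raises where A's rare negative-modulus returns
-- survive, and at p = 1 B's cycle length p - 1 is zero (B raises ZeroDivisionError
-- for nbits ≥ 2 where A returns a list of zeros).
def Pre_generate_bits (seed : Int) (p : Int) (nbits : Int) : Prop := 2 ≤ p ∨ nbits ≤ 0
instance (seed : Int) (p : Int) (nbits : Int) : Decidable (Pre_generate_bits seed p nbits) := by
  unfold Pre_generate_bits; infer_instance

def pvWitness_generate_bits : Int × Int × Int := (1, 7, 3)

def Spec_generate_bits (seed : Int) (p : Int) (nbits : Int) (out : List Int) : Prop := out = generate_bits_alt seed p nbits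
instance (seed : Int) (p : Int) (nbits : Int) (out : List Int) : Decidable (Spec_generate_bits seed p nbits out) := by unfold Spec_generate_bits; infer_instance

-- ===== CLAIM (what is proved, stated in full; the proofs are below) =====
def Claim_equal_generate_bits : Prop := ∀ (seed : Int) (p : Int) (nbits : Int), Dom_generate_bits seed p nbits → Pre_generate_bits seed p nbits → Spec_generate_bits seed p nbits (generate_bits seed p nbits)

-- ===== LEMMAS AND PROOFS =====

-- Closed form of A's walk: starting from a state s ∈ [1, p-1], the i-th visited
-- state is ((s - 1 + i) mod (p - 1)) + 1.
theorem walk_closed (p exp : Int) (hp : 2 ≤ p) :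
    ∀ (k : Nat) (s : Int), 1 ≤ s → s ≤ p - 1 →
      gbLoopA p exp k s =
        (List.range k).map
          (fun (i : Nat) => legendre_bit (PySem.Int.mod (s - 1 + (i : Int)) (p - 1) + 1) p exp) := by
  intro k
  induction k with
  | zero => intro s _ _; simp [gbLoopA]
  | succ k ih =>
    intro s h1 h2
    have hs0 : ¬ (s = 0) := by omega
    have hmod0 : PySem.Int.mod (s - 1 + ((0 : Nat) : Int)) (p - 1) = s - 1 := by
      rw [show ((0 : Nat) : Int) = 0 from rfl, add_zero,
        PySem.Int.mod_eq_emod_of_pos (by omega)]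
      exact Int.emod_eq_of_lt (by omega) (by omega)
    -- the next state and its bounds
    have hb0 : 0 ≤ PySem.Int.mod (s + 1) p := PySem.Int.mod_nonneg _ (by omega)
    have hb1 : PySem.Int.mod (s + 1) p < p := PySem.Int.mod_lt _ (by omega)
    set s1 := PySem.Int.mod (s + 1) p with hs1
    set s2 := (if s1 = 0 then s1 + 1 else s1) with hs2
    have hs2b : 1 ≤ s2 ∧ s2 ≤ p - 1 := by
      rw [hs2]; split_ifs with h <;> omega
    -- congruence: s2 - 1 ≡ s  (mod p - 1)
    have key : ∀ i : Int,
        PySem.Int.mod (s2 - 1 + i) (p - 1) = PySem.Int.mod (s + i) (p - 1) := by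
      intro i
      rw [PySem.Int.mod_eq_emod_of_pos (by omega), PySem.Int.mod_eq_emod_of_pos (by omega)]
      by_cases hend : s = p - 1
      · have hz : s1 = 0 := by
          rw [hs1, PySem.Int.mod_eq_emod_of_pos (by omega), hend]
          simp
        have : s2 = 1 := by rw [hs2, if_pos hz]; omega
        rw [this, hend]
        have : p - 1 + i = (p - 1) + i := by rfl
        rw [this, Int.add_emod_left]
        norm_num
      · have hlt : s1 = s + 1 := by
          rw [hs1, PySem.Int.mod_eq_emod_of_pos (by omega)]
          exact Int.emod_eq_of_lt (by omega) (by omega)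
        have : s2 = s + 1 := by rw [hs2, hlt]; split_ifs with h <;> omega
        rw [this]
        congr 1
        omega
    rw [gbLoopA]
    simp only [if_neg hs0]
    rw [ih s2 hs2b.1 hs2b.2, List.range_succ_eq_map, List.map_cons, List.map_map, hmod0]
    refine congrArg₂ List.cons (congrArg (fun x => legendre_bit x p exp) (by omega)) ?_
    apply List.map_congr_left
    intro i _
    simp only [Function.comp_apply]
    have hci : ((Nat.succ i : Nat) : Int) = (i : Int) + 1 := by push_cast; ring
    have harg : s - 1 + ((i : Int) + 1) = s + (i : Int) := by omega
    rw [hci, harg, key (i : Int)]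

-- ===== VERDICT (by name: the statement is the Claim_ definition above) =====
theorem generate_bits_spec : Claim_equal_generate_bits := by
  intro seed p nbits _ hpre
  unfold Pre_generate_bits at hpre
  unfold Spec_generate_bits generate_bits generate_bits_alt
  by_cases hn : nbits ≤ 0
  · have : nbits.toNat = 0 := by omega
    rw [this, if_pos hn]
    rfl
  · have hp : 2 ≤ p := by omega
    rw [if_neg hn]
    have hsplit : nbits.toNat = (nbits - 1).toNat + 1 := by omega
    rw [hsplit, gbLoopA]
    have hfirst : (if seed = 0 then seed + 1 else seed) = (if seed = 0 then 1 else seed) := by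
      split_ifs with h <;> omega
    simp only [hfirst]
    set first := if seed = 0 then (1 : Int) else seed with hf
    set t0' := PySem.Int.mod (first + 1) p with ht0'
    have hb0 : 0 ≤ t0' := PySem.Int.mod_nonneg _ (by omega)
    have hb1 : t0' < p := PySem.Int.mod_lt _ (by omega)
    have ht0eq : (if t0' = 0 then t0' + 1 else t0') = (if t0' = 0 then 1 else t0') := by
      split_ifs with h <;> omega
    rw [ht0eq]
    set t0 := if t0' = 0 then (1 : Int) else t0' with ht0
    have ht0b : 1 ≤ t0 ∧ t0 ≤ p - 1 := by rw [ht0]; split_ifs with h <;> omega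
    rw [walk_closed p _ hp _ t0 ht0b.1 ht0b.2]
    rw [PySem.List.pyRange_one 0 (nbits - 1), List.map_map]
    congr 1
    have hlen : nbits - 1 - 0 = nbits - 1 := by ring
    rw [hlen]
    apply List.map_congr_left
    intro i _
    simp only [Function.comp_apply, zero_add]
    unfold legendre_bit
    rfl
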